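-- pv_equiv track=rewrite | github.com/drew-ellingson/advent_of_code_2017 | day_9/p1.py | compress_garbage
-- ===== SOURCE A (Python) =====
-- def compress_garbage(cleaner_garbage):
--     """compresses any garbage to a '<>' string"""
--     output_string = ''
--     active_garbage = False
--     for char in cleaner_garbage:
--         if char == '<':
--             active_garbage = True
--         if not active_garbage:
--             output_string = output_string + char
--         if char == '>':
--             active_garbage = False
--     return output_string
-- ===== SOURCE B (Python) =====
-- def compress_garbage(cleaner_garbage):
--     """compresses any garbage to a '<>' string"""
--     chars = list(cleaner_garbage)
--     n = len(chars)
--     out = []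
--     i = 0
--     while i < n:
--         c = chars[i]
--         if c == '<':
--             i += 1
--             while i < n and chars[i] != '>':
--                 i += 1
--             i += 1  # step past the closing '>' (or past the end)
--         else:
--             out.append(c)
--             i += 1
--     return ''.join(out)
-- ===== Notes on version B (the rewrite author's own statement) =====
-- stated objective: alternative
-- what changed: Replaces the boolean-flag state machine that builds the output by string concatenation with a chunk scanner: an outer loop copies non-garbage characters and, at each '<', an inner skip loop jumps past the matching '>' in one go; the result is joined once at the end.
import Mathlib
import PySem

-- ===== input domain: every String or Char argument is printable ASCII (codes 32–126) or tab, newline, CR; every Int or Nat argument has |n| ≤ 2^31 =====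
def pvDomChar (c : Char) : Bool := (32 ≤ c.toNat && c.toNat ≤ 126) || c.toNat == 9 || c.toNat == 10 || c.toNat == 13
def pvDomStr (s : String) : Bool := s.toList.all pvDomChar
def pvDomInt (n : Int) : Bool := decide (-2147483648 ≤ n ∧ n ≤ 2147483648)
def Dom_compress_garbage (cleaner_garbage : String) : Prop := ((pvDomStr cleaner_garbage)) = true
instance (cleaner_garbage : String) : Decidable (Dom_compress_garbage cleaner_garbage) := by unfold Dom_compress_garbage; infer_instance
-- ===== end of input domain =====

-- B replaces A's boolean-flag state machine with a chunk scanner (copy until '<', skip through '>'): an alternative decomposition of the same task.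

-- ===== PORT A =====
-- one iteration of A's for-loop: state = (output_string as List Char, active_garbage)
def cgAStep (st : List Char × Bool) (c : Char) : List Char × Bool :=
  let ag := if c = '<' then true else st.2
  let out := if ag = false then st.1 ++ [c] else st.1
  let ag2 := if c = '>' then false else ag
  (out, ag2)

def compress_garbage (cleaner_garbage : String) : String :=
  String.mk (cleaner_garbage.toList.foldl cgAStep ([], false)).1

-- ===== PORT B =====
-- inner while loop of B: skip characters up to and including the first '>'
def cgSkip : List Char → List Char
  | [] => []
  | c :: cs => if c = '>' then cs else cgSkip cs

theorem cgSkip_length_le (l : List Char) : (cgSkip l).length ≤ l.length := by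
  induction l with
  | nil => simp [cgSkip]
  | cons c cs ih => simp only [cgSkip]; split <;> simp <;> omega

-- outer while loop of B: copy non-'<' characters, on '<' skip the garbage chunk
def cgScan : List Char → List Char
  | [] => []
  | c :: cs =>
    if c = '<' then cgScan (cgSkip cs) else c :: cgScan cs
termination_by l => l.length
decreasing_by
  · exact Nat.lt_succ_of_le (cgSkip_length_le cs)
  · simp

def compress_garbage_alt (cleaner_garbage : String) : String :=
  String.mk (cgScan cleaner_garbage.toList)

-- ===== PRECONDITION & SPEC =====
def Spec_compress_garbage (cleaner_garbage : String) (out : String) : Prop := out = compress_garbage_alt cleaner_garbage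
instance (cleaner_garbage : String) (out : String) : Decidable (Spec_compress_garbage cleaner_garbage out) := by unfold Spec_compress_garbage; infer_instance

-- ===== CLAIM (what is proved, stated in full; the proofs are below) =====
def Claim_equal_compress_garbage : Prop := ∀ (cleaner_garbage : String), Dom_compress_garbage cleaner_garbage → Spec_compress_garbage cleaner_garbage (compress_garbage cleaner_garbage)

-- ===== LEMMAS AND PROOFS =====

-- A's fold, run from flag=false resp. flag=true, equals B's scan (resp. scan after skipping the open chunk)
theorem cgFold_eq_scan (l : List Char) :
    (∀ acc, (l.foldl cgAStep (acc, false)).1 = acc ++ cgScan l) ∧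
    (∀ acc, (l.foldl cgAStep (acc, true)).1 = acc ++ cgScan (cgSkip l)) := by
  induction l with
  | nil => simp [cgScan, cgSkip]
  | cons c cs ih =>
    constructor
    · intro acc
      by_cases h : c = '<'
      · subst h
        have hstep : cgAStep (acc, false) '<' = (acc, true) := by simp [cgAStep]
        rw [List.foldl_cons, hstep, ih.2, cgScan, if_pos rfl]
      · have hstep : cgAStep (acc, false) c = (acc ++ [c], false) := by
          by_cases h2 : c = '>' <;> simp [cgAStep, h, h2]
        rw [List.foldl_cons, hstep, ih.1, cgScan, if_neg h, List.append_assoc]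
        simp
    · intro acc
      by_cases h2 : c = '>'
      · subst h2
        have hstep : cgAStep (acc, true) '>' = (acc, false) := by simp [cgAStep]
        rw [List.foldl_cons, hstep, ih.1, cgSkip, if_pos rfl]
      · have hstep : cgAStep (acc, true) c = (acc, true) := by
          by_cases h : c = '<' <;> simp [cgAStep, h, h2]
        rw [List.foldl_cons, hstep, ih.2]
        simp [cgSkip, h2]

-- ===== VERDICT (by name: the statement is the Claim_ definition above) =====
theorem compress_garbage_spec : Claim_equal_compress_garbage := by
  intro s _
  unfold Spec_compress_garbage compress_garbage compress_garbage_alt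
  rw [(cgFold_eq_scan s.toList).1 []]
  simp
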